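-- pv_equiv track=rewrite | github.com/M4skEl/Greedy_alg | main.py | zero_count
-- ===== SOURCE A (Python) =====
-- def zero_count(str):
--     count = 0
--     for i in range(len(str)):
--         if str[len(str) - 1 - i] == '0':
--             count += 1
--         if str[len(str) - 1 - i] == '1':
--             break
--     return count
-- ===== SOURCE B (Python) =====
-- def zero_count(str):
--     rev = str[::-1]
--     i = rev.find('1')
--     if i == -1:
--         return rev.count('0')
--     return rev[:i].count('0')
-- ===== Notes on version B (the rewrite author's own statement) =====
-- stated objective: idiomatic
-- what changed: Replaces A's explicit reverse index loop with early break by a locate-boundary-then-count decomposition: reverse the string, locate the first '1' with str.find, and count '0's in the prefix before it with str.count, no explicit Python loop.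
import Mathlib
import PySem

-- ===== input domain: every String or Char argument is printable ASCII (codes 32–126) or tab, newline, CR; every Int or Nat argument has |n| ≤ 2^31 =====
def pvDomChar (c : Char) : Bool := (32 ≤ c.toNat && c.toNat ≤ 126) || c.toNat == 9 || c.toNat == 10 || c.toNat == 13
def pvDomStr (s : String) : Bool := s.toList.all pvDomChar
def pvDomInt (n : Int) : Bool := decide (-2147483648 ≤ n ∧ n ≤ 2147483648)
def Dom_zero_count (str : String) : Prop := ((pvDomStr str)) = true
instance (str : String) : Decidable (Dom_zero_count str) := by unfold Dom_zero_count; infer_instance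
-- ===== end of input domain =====

-- B replaces A's explicit reverse index loop (with early break) by reverse + find('1') +
-- count('0') on the prefix before it — a locate-then-count decomposition with no explicit loop.

-- ===== PORT A =====
-- A reads str[len-1-i] for i = 0,1,…, i.e. it walks the characters from the end;
-- the loop with its break is this structural recursion over the reversed char list.
def zcLoopA : List Char → Int → Int
  | [], count => count
  | c :: rest, count =>
      let count' := if c == '0' then count + 1 else count
      if c == '1' then count' else zcLoopA rest count'

def zero_count (str : String) : Int := zcLoopA str.toList.reverse 0

-- ===== PORT B =====
def zero_count_alt (str : String) : Int :=
  let rev : String := String.ofList str.toList.reverse  -- str[::-1]; exact: PySem.Str.slice?_none_none_neg_one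
  let i := PySem.Str.find rev "1"
  if i == -1 then (PySem.Str.count rev "0" : Int)
  else (PySem.Str.count (PySem.Str.slice rev none (some i)) "0" : Int)

-- ===== PRECONDITION & SPEC =====
def Spec_zero_count (str : String) (out : Int) : Prop := out = zero_count_alt str
instance (str : String) (out : Int) : Decidable (Spec_zero_count str out) := by unfold Spec_zero_count; infer_instance

-- ===== CLAIM (what is proved, stated in full; the proofs are below) =====
def Claim_equal_zero_count : Prop := ∀ (str : String), Dom_zero_count str → Spec_zero_count str (zero_count str)

-- ===== LEMMAS AND PROOFS =====

-- s.count('0') for the single-char needle is plain list count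
theorem countGo_zero (l : List Char) : ∀ (fuel acc : Nat), l.length ≤ fuel →
    PySem.Chars.count.go ['0'] fuel l acc = acc + l.count '0' := by
  induction l with
  | nil => intro fuel acc _; cases fuel <;> simp [PySem.Chars.count.go]
  | cons h t ih =>
      intro fuel acc hle
      cases fuel with
      | zero => simp at hle
      | succ f =>
          by_cases h0 : h = '0'
          · subst h0
            simp only [PySem.Chars.count.go, List.isPrefixOf]
            simp only [List.length_cons] at hle
            rw [show List.drop (['0'].length) ('0' :: t) = t from rfl] at *
            simp only [beq_self_eq_true, Bool.and_true]
            rw [ih f (acc + 1) (by omega)]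
            simp; ring
          · simp only [PySem.Chars.count.go, List.isPrefixOf]
            simp only [List.length_cons] at hle
            rw [if_neg (by simp [Ne.symm h0])]
            rw [ih f acc (by omega)]
            simp [h0]

theorem count_zero_char (l : List Char) : PySem.Chars.count l ['0'] = l.count '0' := by
  have h : PySem.Chars.count l ['0'] = PySem.Chars.count.go ['0'] l.length l 0 := by
    simp [PySem.Chars.count]
  rw [h, countGo_zero l l.length 0 le_rfl, Nat.zero_add]

-- A's loop counts '0's in the maximal '1'-free prefix
theorem zcLoopA_eq (l : List Char) : ∀ (c : Int),
    zcLoopA l c = c + ((l.takeWhile (fun x => x != '1')).count '0' : Int) := by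
  induction l with
  | nil => intro c; simp [zcLoopA]
  | cons h t ih =>
      intro c
      by_cases h1 : h = '1'
      · subst h1
        simp [zcLoopA, List.takeWhile]
      · by_cases h0 : h = '0'
        · subst h0
          simp [zcLoopA, List.takeWhile, ih]
          ring
        · simp only [zcLoopA, if_neg (by simp [h0] : ¬ (h == '0') = true),
                if_neg (by simp [h1] : ¬ (h == '1') = true), ih,
                List.takeWhile_cons, if_pos (by simp [h1] : (h != '1') = true),
                List.count_cons]
          omega

-- single-char prefix
theorem singleton_prefix_iff (c : Char) (l : List Char) : [c] <+: l ↔ l.head? = some c := by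
  cases l with
  | nil => simp
  | cons h t => simp [List.cons_prefix_cons, eq_comm]

-- first '1' at index n ⇒ the '1'-free takeWhile is exactly take n
theorem takeWhile_eq_take_of_first (l : List Char) : ∀ (n : Nat),
    (∀ k, k < n → (l.drop k).head? ≠ some '1') → (l.drop n).head? = some '1' →
    l.takeWhile (fun x => x != '1') = l.take n := by
  induction l with
  | nil => intro n _ hn; simp at hn
  | cons h t ih =>
      intro n hlt hn
      cases n with
      | zero => simp at hn; simp [List.takeWhile, hn]
      | succ m =>
          have hh : h ≠ '1' := by
            have := hlt 0 (Nat.succ_pos m); simpa using this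
          simp only [List.drop_succ_cons] at hn
          have := ih m (fun k hk => by
            have := hlt (k+1) (by omega); simpa using this) hn
          simp [show (h != '1') = true by simp [hh], this]

-- no '1' ⇒ takeWhile keeps everything
theorem takeWhile_eq_self_of_no_one (l : List Char) (h : '1' ∉ l) :
    l.takeWhile (fun x => x != '1') = l := by
  rw [List.takeWhile_eq_self_iff]
  intro x hx
  simp only [bne_iff_ne, ne_eq]
  exact fun he => h (he ▸ hx)

-- ===== VERDICT (by name: the statement is the Claim_ definition above) =====
theorem zero_count_spec : Claim_equal_zero_count := by
  intro str _
  unfold Spec_zero_count zero_count zero_count_alt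
  set r : List Char := str.toList.reverse with hr
  have hrev : (String.ofList str.toList.reverse).toList = r := by simp [hr]
  rw [zcLoopA_eq]
  simp only [zero_add]
  have hfc : PySem.Str.find (String.ofList str.toList.reverse) "1"
      = PySem.Chars.find r ['1'] := by
    rw [PySem.Str.find_eq, hrev]; rfl
  rw [hfc]
  by_cases hfind : PySem.Chars.find r ['1'] = -1
  · rw [if_pos (by simp [hfind])]
    have hnf : ¬ ['1'] <:+: r := by
      rw [← PySem.Chars.find_eq_neg_one_iff]; exact hfind
    have hno : '1' ∉ r := fun hm => hnf ((List.singleton_infix_iff '1' r).mpr hm)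
    rw [takeWhile_eq_self_of_no_one r hno]
    simp [PySem.Str.count_eq, count_zero_char]
  · rw [if_neg (by simpa using hfind)]
    set i : Int := PySem.Chars.find r ['1'] with hi
    have hpos : 0 ≤ i := by
      rw [hi, PySem.Chars.find_nonneg_iff, ← PySem.Chars.find_ne_neg_one_iff, ← hi]
      exact hfind
    obtain ⟨hpre, hmin⟩ := PySem.Chars.find_spec (s := r) (sub := ['1']) hpos
    have htake : r.takeWhile (fun x => x != '1') = r.take i.toNat := by
      apply takeWhile_eq_take_of_first
      · intro k hk hc
        exact hmin k hk ((singleton_prefix_iff _ _).mpr hc)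
      · exact (singleton_prefix_iff _ _).mp hpre
    rw [htake]
    simp [PySem.Str.count_eq, PySem.Str.toList_slice, count_zero_char,
          PySem.List.slice_to r hpos]
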